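-- pv_equiv track=rewrite | github.com/MrBrantCode/unitest_baseline | mut_generate/mist_train_cf/cf_55243/solution.py | exchange
-- ===== SOURCE A (Python) =====
-- def exchange(lst1, lst2):
--     if sum(lst1) % 2 != 0 or sum(lst2) % 2 != 0:
--         return "NO"
--
--     for i in range(len(lst1)):
--         if lst1[i] % 2 != 0:
--             has_swap = False
--             for j in range(len(lst2)):
--                 if lst2[j] % 2 == 0:
--                     lst1[i], lst2[j] = lst2[j], lst1[i]
--                     has_swap = True
--                     break
--             if not has_swap:
--                 return "NO"
--
--     return "YES"
-- ===== SOURCE B (Python) =====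
-- def exchange(lst1, lst2):
--     if sum(lst1) % 2 != 0 or sum(lst2) % 2 != 0:
--         return "NO"
--     odds1 = len([x for x in lst1 if x % 2 != 0])
--     evens2 = len([x for x in lst2 if x % 2 == 0])
--     return "YES" if odds1 <= evens2 else "NO"
-- ===== Notes on version B (the rewrite author's own statement) =====
-- stated objective: simpler
-- what changed: Replaces the mutating nested swap loop (for each odd in lst1, scan lst2 for an even to swap) with a single counting pass: after the sum-parity check, answer YES iff the number of odds in lst1 is at most the number of evens in lst2.
import Mathlib
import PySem

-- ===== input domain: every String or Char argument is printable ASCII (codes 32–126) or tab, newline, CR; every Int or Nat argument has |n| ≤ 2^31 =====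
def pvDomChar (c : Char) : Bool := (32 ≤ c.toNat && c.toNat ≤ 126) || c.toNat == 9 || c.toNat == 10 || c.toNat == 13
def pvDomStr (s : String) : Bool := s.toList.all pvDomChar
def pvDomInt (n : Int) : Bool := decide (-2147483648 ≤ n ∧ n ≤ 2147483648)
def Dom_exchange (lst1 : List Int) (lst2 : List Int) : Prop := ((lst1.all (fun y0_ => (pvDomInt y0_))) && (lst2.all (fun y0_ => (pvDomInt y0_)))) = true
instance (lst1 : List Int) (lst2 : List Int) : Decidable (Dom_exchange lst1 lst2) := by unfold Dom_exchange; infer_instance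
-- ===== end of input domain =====

-- B replaces A's mutating nested swap loop by a single counting pass (odds in lst1 vs evens in lst2): simpler.
-- A mutates lst1/lst2 in place in Python; the equivalence proved here is about the RETURN value only (B does not mutate).

-- ===== PORT A =====
-- inner loop 'for j in range(len(lst2)): if lst2[j] % 2 == 0: swap; break':
-- scans lst2 left to right, writes lst1[i]'s old value x over the first even entry, breaks.
-- (lst1[i] also receives the even value in Python, but index i is never read again, so the
-- returned-value-faithful state is lst2 alone.) none = no even found (has_swap stays False).
def exchangeSwapFirstEven (x : Int) : List Int → Option (List Int)
  | [] => none
  | y :: ys =>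
    if PySem.Int.mod y 2 == 0 then some (x :: ys)
    else (exchangeSwapFirstEven x ys).map (fun zs => y :: zs)

-- outer loop 'for i in range(len(lst1))', carrying the current lst2
def exchangeLoop : List Int → List Int → String
  | [], _ => "YES"
  | x :: rest, lst2 =>
    if PySem.Int.mod x 2 != 0 then
      match exchangeSwapFirstEven x lst2 with
      | some lst2' => exchangeLoop rest lst2'
      | none => "NO"
    else exchangeLoop rest lst2

def exchange (lst1 : List Int) (lst2 : List Int) : String :=
  if PySem.Int.mod (lst1.foldl (· + ·) 0) 2 != 0 || PySem.Int.mod (lst2.foldl (· + ·) 0) 2 != 0 then "NO"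
  else exchangeLoop lst1 lst2

-- ===== PORT B =====
def exchange_alt (lst1 : List Int) (lst2 : List Int) : String :=
  if PySem.Int.mod (lst1.foldl (· + ·) 0) 2 != 0 || PySem.Int.mod (lst2.foldl (· + ·) 0) 2 != 0 then "NO"
  else
    let odds1 := (lst1.filter (fun x => PySem.Int.mod x 2 != 0)).length
    let evens2 := (lst2.filter (fun x => PySem.Int.mod x 2 == 0)).length
    if odds1 ≤ evens2 then "YES" else "NO"

-- ===== PRECONDITION & SPEC =====
def Spec_exchange (lst1 : List Int) (lst2 : List Int) (out : String) : Prop := out = exchange_alt lst1 lst2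
instance (lst1 : List Int) (lst2 : List Int) (out : String) : Decidable (Spec_exchange lst1 lst2 out) := by unfold Spec_exchange; infer_instance

-- ===== CLAIM (what is proved, stated in full; the proofs are below) =====
def Claim_equal_exchange : Prop := ∀ (lst1 : List Int) (lst2 : List Int), Dom_exchange lst1 lst2 → Spec_exchange lst1 lst2 (exchange lst1 lst2)

-- ===== LEMMAS AND PROOFS =====

theorem swapFirstEven_none (x : Int) (l : List Int) :
    exchangeSwapFirstEven x l = none ↔ (l.filter (fun y => PySem.Int.mod y 2 == 0)).length = 0 := by
  induction l with
  | nil => simp [exchangeSwapFirstEven]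
  | cons y ys ih =>
    by_cases hy : (PySem.Int.mod y 2 == 0) = true
    · rw [exchangeSwapFirstEven, if_pos hy, List.filter_cons, if_pos hy]
      simp
    · rw [exchangeSwapFirstEven, if_neg hy, List.filter_cons, if_neg hy]
      simp [ih]

theorem swapFirstEven_some (x : Int) (hx : ¬ (PySem.Int.mod x 2 == 0) = true) (l l' : List Int)
    (h : exchangeSwapFirstEven x l = some l') :
    (l'.filter (fun y => PySem.Int.mod y 2 == 0)).length + 1
      = (l.filter (fun y => PySem.Int.mod y 2 == 0)).length := by
  induction l generalizing l' with
  | nil => simp [exchangeSwapFirstEven] at h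
  | cons y ys ih =>
    by_cases hy : (PySem.Int.mod y 2 == 0) = true
    · rw [exchangeSwapFirstEven, if_pos hy] at h
      obtain rfl : x :: ys = l' := Option.some.inj h
      rw [List.filter_cons, if_neg hx, List.filter_cons, if_pos hy]
      simp
    · rw [exchangeSwapFirstEven, if_neg hy] at h
      obtain ⟨zs, hzs, rfl⟩ := Option.map_eq_some_iff.mp h
      rw [List.filter_cons, if_neg hy, List.filter_cons, if_neg hy]
      exact ih zs hzs

theorem exchangeLoop_eq (l1 l2 : List Int) :
    exchangeLoop l1 l2 =
      if (l1.filter (fun x => PySem.Int.mod x 2 != 0)).length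
          ≤ (l2.filter (fun x => PySem.Int.mod x 2 == 0)).length
      then "YES" else "NO" := by
  induction l1 generalizing l2 with
  | nil => simp [exchangeLoop]
  | cons x rest ih =>
    by_cases hx : (PySem.Int.mod x 2 != 0) = true
    · have hx' : ¬ (PySem.Int.mod x 2 == 0) = true := by
        simpa [bne] using hx
      rw [exchangeLoop, if_pos hx, List.filter_cons, if_pos hx]
      rcases hs : exchangeSwapFirstEven x l2 with _ | l2'
      · have h0 := (swapFirstEven_none x l2).mp hs
        show "NO" = _
        rw [h0]
        simp
      · have h1 := swapFirstEven_some x hx' l2 l2' hs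
        show exchangeLoop rest l2' = _
        rw [ih l2']
        simp only [List.length_cons]
        by_cases hle : (rest.filter (fun x => PySem.Int.mod x 2 != 0)).length
            ≤ (l2'.filter (fun x => PySem.Int.mod x 2 == 0)).length
        · rw [if_pos hle, if_pos (by omega)]
        · rw [if_neg hle, if_neg (by omega)]
    · rw [exchangeLoop, if_neg hx, List.filter_cons, if_neg hx]
      exact ih l2

-- ===== VERDICT (by name: the statement is the Claim_ definition above) =====
theorem exchange_spec : Claim_equal_exchange := by
  intro lst1 lst2 _
  unfold Spec_exchange exchange exchange_alt
  split
  · rfl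
  · exact exchangeLoop_eq lst1 lst2
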